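-- pv_equiv track=rewrite | github.com/venkatmiriyala19/CodingNinjas | Row Wave Form.py | rowWaveForm
-- ===== SOURCE A (Python) =====
-- def rowWaveForm(mat):
--     a=[]
--     flag=True
--     for i in mat:
--         if  flag:
--             a.append(i)
--             flag=False
--         else:
--             b=[]
--             b[:]=i
--             b.reverse()
--             a.append(b)
--             flag=True
--
--     b=[]
--     for i in a:
--         b+=i
--     return b
--     # Write your code here.
--     pass
-- ===== SOURCE B (Python) =====
-- def rowWaveForm(mat):
--     out = []
--     rest = mat
--     while rest:
--         out += rest[0]
--         if len(rest) > 1: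
--             out += rest[1][::-1]
--         rest = rest[2:]
--     return out
-- ===== Notes on version B (the rewrite author's own statement) =====
-- stated objective: alternative
-- what changed: A toggles a boolean flag per row to build an intermediate list of rows and then flattens it in a second loop; B consumes the matrix two rows per iteration of a while loop on the remaining suffix (emit first row, emit second reversed, drop both), so there is no per-row parity state, no intermediate list of rows and no second pass.
import Mathlib
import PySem

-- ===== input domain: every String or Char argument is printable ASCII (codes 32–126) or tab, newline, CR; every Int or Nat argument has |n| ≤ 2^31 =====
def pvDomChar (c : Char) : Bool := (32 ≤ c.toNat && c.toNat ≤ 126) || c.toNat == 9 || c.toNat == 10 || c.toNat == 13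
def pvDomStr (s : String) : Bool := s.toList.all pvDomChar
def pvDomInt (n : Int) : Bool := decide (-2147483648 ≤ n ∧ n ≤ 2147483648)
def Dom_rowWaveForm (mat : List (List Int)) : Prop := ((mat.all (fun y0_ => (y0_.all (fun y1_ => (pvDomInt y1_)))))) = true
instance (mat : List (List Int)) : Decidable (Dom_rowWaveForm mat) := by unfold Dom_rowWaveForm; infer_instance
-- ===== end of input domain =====

-- B replaces A's flag-toggled build of a list of rows plus a second flattening loop by a
-- while loop that consumes the remaining suffix two rows at a time; same cost, no speed claim.

-- ===== PORT A =====
-- two-stage: build the list of rows `a` with a toggling flag, then flatten it in a second loop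
def rowWaveForm (mat : List (List Int)) : List Int :=
  (mat.foldl
    (fun (s : List (List Int) × Bool) i =>
      if s.2 then (s.1 ++ [i], false)
      else (s.1 ++ [i.reverse], true))   -- b=[]; b[:]=i; b.reverse() : a fresh reversed copy of i
    ([], true)).1.foldl (fun b i => b ++ i) []

-- ===== PORT B =====
-- while rest: out += rest[0]; if len(rest) > 1: out += rest[1][::-1]; rest = rest[2:]
-- The while loop becomes the structural recursion on `rest`: the `[r]` case is the iteration
-- where len(rest) = 1 (no second row), `r1 :: r2 :: rs` the iteration where len(rest) > 1
-- (rest[1][::-1] = r2.reverse, rest[2:] = rs).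
def pvB_loop : List Int → List (List Int) → List Int
  | out, [] => out
  | out, [r] => out ++ r
  | out, r1 :: r2 :: rs => pvB_loop (out ++ r1 ++ r2.reverse) rs

def rowWaveForm_alt (mat : List (List Int)) : List Int :=
  pvB_loop [] mat

-- ===== PRECONDITION & SPEC =====
def Spec_rowWaveForm (mat : List (List Int)) (out : List Int) : Prop := out = rowWaveForm_alt mat
instance (mat : List (List Int)) (out : List Int) : Decidable (Spec_rowWaveForm mat out) := by unfold Spec_rowWaveForm; infer_instance

-- ===== CLAIM (what is proved, stated in full; the proofs are below) =====
def Claim_equal_rowWaveForm : Prop := ∀ (mat : List (List Int)), Dom_rowWaveForm mat → Spec_rowWaveForm mat (rowWaveForm mat)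

-- ===== LEMMAS AND PROOFS =====

-- canonical list of rows built by A's first loop, parameterised by the current flag
def pvRows : Bool → List (List Int) → List (List Int)
  | _, [] => []
  | true, r :: rs => r :: pvRows false rs
  | false, r :: rs => r.reverse :: pvRows true rs

theorem pvA_fold (mat : List (List Int)) :
    ∀ (acc : List (List Int)) (flag : Bool),
      (mat.foldl (fun (s : List (List Int) × Bool) i =>
          if s.2 then (s.1 ++ [i], false) else (s.1 ++ [i.reverse], true)) (acc, flag)).1
        = acc ++ pvRows flag mat := by
  induction mat with
  | nil => intro acc flag; simp [pvRows]
  | cons r rs ih =>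
    intro acc flag
    cases flag <;> simp [List.foldl_cons, pvRows, ih]

theorem pvFlatten_fold (l : List (List Int)) :
    ∀ (acc : List Int), l.foldl (fun b i => b ++ i) acc = acc ++ l.flatten := by
  induction l with
  | nil => intro acc; simp
  | cons r rs ih => intro acc; simp [List.foldl_cons, ih]

theorem pvB_loop_eq (out : List Int) (mat : List (List Int)) :
    pvB_loop out mat = out ++ (pvRows true mat).flatten := by
  induction out, mat using pvB_loop.induct with
  | case1 out => simp [pvB_loop, pvRows]
  | case2 out r => simp [pvB_loop, pvRows]
  | case3 out r1 r2 rs ih => simp [pvB_loop, pvRows, List.append_assoc] at ih ⊢; exact ih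

-- ===== VERDICT (by name: the statement is the Claim_ definition above) =====
theorem rowWaveForm_spec : Claim_equal_rowWaveForm := by
  intro mat _
  show rowWaveForm mat = rowWaveForm_alt mat
  unfold rowWaveForm rowWaveForm_alt
  rw [pvA_fold mat [] true, pvFlatten_fold, pvB_loop_eq]
  simp
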